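-- pv_equiv track=rewrite | github.com/CHIRAG3899/CodeChef | Group Assignment.py | GROUPASSGN
-- ===== SOURCE A (Python) =====
-- def GROUPASSGN(N,X):
--     f=2*N
--     for e in range(1,N+1):
--         y=e
--         z=f-e + 1
--         if y== X:
--             return z
--         if z==X:
--             return y
-- ===== SOURCE B (Python) =====
-- def GROUPASSGN(N, X):
--     if 1 <= X <= 2 * N:
--         return 2 * N - X + 1
--     return None
-- ===== Notes on version B (the rewrite author's own statement) =====
-- stated objective: faster
-- what changed: Replaced the linear scan over pairs (e, 2N-e+1) with the closed-form partner 2N-X+1 behind a range check 1 <= X <= 2N.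
import Mathlib
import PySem

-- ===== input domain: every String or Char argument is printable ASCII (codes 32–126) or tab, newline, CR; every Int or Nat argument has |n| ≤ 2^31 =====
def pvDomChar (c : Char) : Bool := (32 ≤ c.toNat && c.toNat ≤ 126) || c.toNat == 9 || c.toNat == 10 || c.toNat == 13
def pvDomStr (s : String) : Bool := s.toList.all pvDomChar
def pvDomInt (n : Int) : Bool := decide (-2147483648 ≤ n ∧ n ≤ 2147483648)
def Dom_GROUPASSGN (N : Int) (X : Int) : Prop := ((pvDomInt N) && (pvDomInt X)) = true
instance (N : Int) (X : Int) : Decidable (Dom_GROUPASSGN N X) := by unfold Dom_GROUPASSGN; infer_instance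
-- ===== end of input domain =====

-- B replaces A's linear scan over the pairs (e, 2N-e+1) by the closed form 2N-X+1 with a range guard (objective: faster).

-- ===== PORT A =====
-- the for-loop with its two early returns, as a structural recursion over the range list
def GROUPASSGN_loop (f X : Int) : List Int → Option Int
  | [] => none
  | e :: rest =>
      let y := e
      let z := f - e + 1
      if y = X then some z
      else if z = X then some y
      else GROUPASSGN_loop f X rest

def GROUPASSGN (N : Int) (X : Int) : Option Int :=
  let f := 2 * N
  GROUPASSGN_loop f X (PySem.List.pyRange 1 (N + 1) 1)

-- ===== PORT B =====
def GROUPASSGN_alt (N : Int) (X : Int) : Option Int :=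
  if 1 ≤ X ∧ X ≤ 2 * N then some (2 * N - X + 1) else none

-- ===== PRECONDITION & SPEC =====
def Spec_GROUPASSGN (N : Int) (X : Int) (out : Option Int) : Prop := out = GROUPASSGN_alt N X
instance (N : Int) (X : Int) (out : Option Int) : Decidable (Spec_GROUPASSGN N X out) := by unfold Spec_GROUPASSGN; infer_instance

-- ===== CLAIM (what is proved, stated in full; the proofs are below) =====
def Claim_equal_GROUPASSGN : Prop := ∀ (N : Int) (X : Int), Dom_GROUPASSGN N X → Spec_GROUPASSGN N X (GROUPASSGN N X)

-- ===== LEMMAS AND PROOFS =====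

-- characterisation of A's loop over a suffix range(a, N+1)
theorem GROUPASSGN_loop_pyRange (N X : Int) :
    ∀ (n : Nat) (a : Int), (N + 1 - a).toNat = n →
    GROUPASSGN_loop (2 * N) X (PySem.List.pyRange a (N + 1) 1) =
      (if (a ≤ X ∧ X ≤ N) ∨ (N + 1 ≤ X ∧ X ≤ 2 * N + 1 - a) then some (2 * N + 1 - X) else none) := by
  intro n
  induction n with
  | zero =>
      intro a ha
      have hab : N + 1 ≤ a := by omega
      rw [PySem.List.pyRange_one_eq_nil hab]
      simp only [GROUPASSGN_loop]
      rw [if_neg]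
      omega
  | succ m ih =>
      intro a ha
      have hab : a < N + 1 := by omega
      rw [PySem.List.pyRange_one_cons hab]
      simp only [GROUPASSGN_loop]
      by_cases h1 : a = X
      · rw [if_pos h1, if_pos (by omega)]
        exact congrArg some (by omega)
      · rw [if_neg h1]
        by_cases h2 : 2 * N - a + 1 = X
        · rw [if_pos h2, if_pos (by omega)]
          exact congrArg some (by omega)
        · rw [if_neg h2, ih (a + 1) (by omega)]
          by_cases h3 : (a + 1 ≤ X ∧ X ≤ N) ∨ (N + 1 ≤ X ∧ X ≤ 2 * N + 1 - (a + 1))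
          · rw [if_pos h3, if_pos (by omega)]
          · rw [if_neg h3, if_neg (by omega)]

-- ===== VERDICT (by name: the statement is the Claim_ definition above) =====
theorem GROUPASSGN_spec : Claim_equal_GROUPASSGN := by
  intro N X _
  unfold Spec_GROUPASSGN GROUPASSGN GROUPASSGN_alt
  rw [GROUPASSGN_loop_pyRange N X (N + 1 - 1).toNat 1 rfl]
  by_cases h : 1 ≤ X ∧ X ≤ 2 * N
  · rw [if_pos h, if_pos (by omega)]
    exact congrArg some (by omega)
  · rw [if_neg h, if_neg (by omega)]
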